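-- pv_equiv track=rewrite | github.com/infrasonar/esx-probe | lib/utils.py | hostname_to_valid_fqdn
-- ===== SOURCE A (Python) =====
-- ALLOWED_FQDN_CHARS = 'abcdefghijklmnopqrstuvwxyz0123456789-.'
--
-- def hostname_to_valid_fqdn(host_name):
--     fqdn = ''
--     for cr in host_name.lower():
--         if cr in ALLOWED_FQDN_CHARS:
--             fqdn += cr
--         elif cr == '_':
--             fqdn += '-'
--
--     return fqdn
-- ===== SOURCE B (Python) =====
-- import re
--
-- def hostname_to_valid_fqdn(host_name):
--     s = host_name.lower().replace('_', '-')
--     return re.sub(r'[^a-z0-9.-]', '', s)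
-- ===== Notes on version B (the rewrite author's own statement) =====
-- stated objective: idiomatic
-- what changed: Replaces the explicit scan/test/append character loop by two whole-string transformations: lowercase plus str.replace maps underscores to dashes, then a single regex substitution deletes every character outside [a-z0-9.-].
import Mathlib
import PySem

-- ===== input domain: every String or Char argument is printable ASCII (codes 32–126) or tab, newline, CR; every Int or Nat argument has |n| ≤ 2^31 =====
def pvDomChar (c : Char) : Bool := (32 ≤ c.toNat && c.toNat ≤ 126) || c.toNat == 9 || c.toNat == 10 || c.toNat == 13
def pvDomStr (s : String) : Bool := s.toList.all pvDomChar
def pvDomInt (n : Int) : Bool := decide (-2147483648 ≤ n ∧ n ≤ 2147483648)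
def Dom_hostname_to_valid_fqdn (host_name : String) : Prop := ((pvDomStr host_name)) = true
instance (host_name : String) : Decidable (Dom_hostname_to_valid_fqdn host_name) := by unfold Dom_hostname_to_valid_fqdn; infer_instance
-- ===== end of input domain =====

-- B replaces A's per-character scan/test/append loop by whole-string transformations
-- (lower + replace('_','-') + one regex substitution deleting [^a-z0-9.-]); objective: idiomatic.

-- ===== PORT A =====
-- the Python string constant ALLOWED_FQDN_CHARS, as its list of characters
def ALLOWED_FQDN_CHARS : List Char :=
  ['a','b','c','d','e','f','g','h','i','j','k','l','m','n','o','p','q','r','s','t','u','v','w','x','y','z','0','1','2','3','4','5','6','7','8','9','-','.']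

def hostname_to_valid_fqdn (host_name : String) : String :=
  String.mk ((PySem.Str.lower host_name).toList.foldl
    (fun fqdn cr =>
      if ALLOWED_FQDN_CHARS.contains cr then fqdn ++ [cr]
      else if cr = '_' then fqdn ++ ['-']
      else fqdn) [])

-- ===== PORT B =====
-- the regex char class [a-z0-9.-] of Source B, as a per-character test (exact: the class
-- contains exactly the code points a-z, 0-9, '.' and '-')
def fqdnClassChar (c : Char) : Bool :=
  ('a' ≤ c && c ≤ 'z') || ('0' ≤ c && c ≤ '9') || c == '.' || c == '-'

def hostname_to_valid_fqdn_alt (host_name : String) : String :=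
  -- s = host_name.lower().replace('_', '-')
  let s := PySem.Str.replace (PySem.Str.lower host_name) "_" "-"
  -- re.sub(r'[^a-z0-9.-]', '', s): deleting every char outside the class = keeping the class (exact)
  String.mk (s.toList.filter fqdnClassChar)

-- ===== PRECONDITION & SPEC =====
def Spec_hostname_to_valid_fqdn (host_name : String) (out : String) : Prop := out = hostname_to_valid_fqdn_alt host_name
instance (host_name : String) (out : String) : Decidable (Spec_hostname_to_valid_fqdn host_name out) := by unfold Spec_hostname_to_valid_fqdn; infer_instance

-- ===== CLAIM (what is proved, stated in full; the proofs are below) =====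
def Claim_equal_hostname_to_valid_fqdn : Prop := ∀ (host_name : String), Dom_hostname_to_valid_fqdn host_name → Spec_hostname_to_valid_fqdn host_name (hostname_to_valid_fqdn host_name)

-- ===== LEMMAS AND PROOFS =====

def pvSubChar (c : Char) : Char := if c = '_' then '-' else c

lemma pv_replace_go_single (l acc : List Char) :
    PySem.Chars.replace.go ['_'] ['-'] l.length l acc = acc.reverse ++ l.map pvSubChar := by
  induction l generalizing acc with
  | nil => simp [PySem.Chars.replace.go]
  | cons c t ih =>
    by_cases hc : c = '_'
    · subst hc; simp [PySem.Chars.replace.go, ih, pvSubChar]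
    · simp [PySem.Chars.replace.go, ih, pvSubChar, hc, Ne.symm hc]

lemma pv_replace_single (l : List Char) :
    PySem.Chars.replace l ['_'] ['-'] = l.map pvSubChar := by
  simp [PySem.Chars.replace, pv_replace_go_single]

set_option maxRecDepth 4096 in
lemma pv_contains_class (c : Char) : ALLOWED_FQDN_CHARS.contains c = fqdnClassChar c := by
  rcases c with ⟨v, hv⟩
  rw [Bool.eq_iff_iff]
  simp [ALLOWED_FQDN_CHARS, fqdnClassChar, List.mem_cons, Char.ext_iff, UInt32.ext_iff,
    Char.le_def, UInt32.le_iff_toNat_le]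
  omega

lemma pv_step_eq (acc : List Char) (c : Char) :
    (if ALLOWED_FQDN_CHARS.contains c then acc ++ [c]
     else if c = '_' then acc ++ ['-']
     else acc) = acc ++ List.filter fqdnClassChar [pvSubChar c] := by
  by_cases hc : c = '_'
  · subst hc
    rw [if_neg (by decide), if_pos rfl,
      show List.filter fqdnClassChar [pvSubChar '_'] = ['-'] from by decide]
  · by_cases hf : fqdnClassChar c = true
    · rw [if_pos (by rw [pv_contains_class]; exact hf)]
      simp [pvSubChar, hc, hf]
    · simp only [Bool.not_eq_true] at hf
      rw [if_neg (by rw [pv_contains_class, hf]; exact Bool.false_ne_true), if_neg hc]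
      simp [pvSubChar, hc, hf]

lemma pv_fold_eq (l acc : List Char) :
    l.foldl (fun fqdn cr =>
      if ALLOWED_FQDN_CHARS.contains cr then fqdn ++ [cr]
      else if cr = '_' then fqdn ++ ['-']
      else fqdn) acc = acc ++ (l.map pvSubChar).filter fqdnClassChar := by
  induction l generalizing acc with
  | nil => simp
  | cons c t ih =>
    rw [List.foldl_cons]
    show List.foldl _ (if ALLOWED_FQDN_CHARS.contains c then acc ++ [c]
      else if c = '_' then acc ++ ['-'] else acc) t = _
    rw [pv_step_eq, ih, List.map_cons,
      show List.filter fqdnClassChar (pvSubChar c :: t.map pvSubChar)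
        = List.filter fqdnClassChar [pvSubChar c] ++ List.filter fqdnClassChar (t.map pvSubChar) by
          simp [List.filter_cons]; split <;> simp,
      List.append_assoc]

-- ===== VERDICT (by name: the statement is the Claim_ definition above) =====
theorem hostname_to_valid_fqdn_spec : Claim_equal_hostname_to_valid_fqdn := by
  intro host_name _
  unfold Spec_hostname_to_valid_fqdn hostname_to_valid_fqdn hostname_to_valid_fqdn_alt
  rw [pv_fold_eq]
  have hl : (PySem.Str.replace (PySem.Str.lower host_name) "_" "-").toList.filter fqdnClassChar
      = [] ++ ((PySem.Str.lower host_name).toList.map pvSubChar).filter fqdnClassChar := by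
    rw [PySem.Str.toList_replace,
      show ("_" : String).toList = ['_'] from rfl,
      show ("-" : String).toList = ['-'] from rfl]
    rw [pv_replace_single]
    simp
  exact (congrArg String.mk hl).symm
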